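-- pv_equiv track=rewrite | github.com/dudany/usefly | usefly/handlers/reports.py | calculate_node_metrics
-- ===== SOURCE A (Python) =====
-- from typing import List, Optional, Dict
--
-- def calculate_node_metrics(sequences: List[List[str]]) -> Dict[str, Dict[str, int]]:
--     metrics = {}
--
--     for sequence in sequences:
--         prev_url = None
--         for url in sequence:
--             if url not in metrics:
--                 metrics[url] = {"visits": 0, "event_count": 0}
--
--             metrics[url]["event_count"] += 1
--
--             if url != prev_url:
--                 metrics[url]["visits"] += 1
--
--             prev_url = url
--
--     return metrics
-- ===== SOURCE B (Python) =====
-- from typing import List, Dict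
--
-- def calculate_node_metrics(sequences: List[List[str]]) -> Dict[str, Dict[str, int]]:
--     metrics = {}
--     for sequence in sequences:
--         i, n = 0, len(sequence)
--         while i < n:
--             url = sequence[i]
--             j = i + 1
--             while j < n and sequence[j] == url:
--                 j += 1
--             rec = metrics.get(url)
--             if rec is None:
--                 rec = {"visits": 0, "event_count": 0}
--                 metrics[url] = rec
--             rec["event_count"] += j - i
--             rec["visits"] += 1
--             i = j
--     return metrics
-- ===== Notes on version B (the rewrite author's own statement) =====
-- stated objective: alternative
-- what changed: B walks each sequence as maximal runs of equal consecutive URLs with a two-pointer scan, doing one dict access per run (adding the whole run length to event_count and 1 to visits), instead of A's per-element loop that tracks prev_url and updates the dict for every element.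
import Mathlib
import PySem

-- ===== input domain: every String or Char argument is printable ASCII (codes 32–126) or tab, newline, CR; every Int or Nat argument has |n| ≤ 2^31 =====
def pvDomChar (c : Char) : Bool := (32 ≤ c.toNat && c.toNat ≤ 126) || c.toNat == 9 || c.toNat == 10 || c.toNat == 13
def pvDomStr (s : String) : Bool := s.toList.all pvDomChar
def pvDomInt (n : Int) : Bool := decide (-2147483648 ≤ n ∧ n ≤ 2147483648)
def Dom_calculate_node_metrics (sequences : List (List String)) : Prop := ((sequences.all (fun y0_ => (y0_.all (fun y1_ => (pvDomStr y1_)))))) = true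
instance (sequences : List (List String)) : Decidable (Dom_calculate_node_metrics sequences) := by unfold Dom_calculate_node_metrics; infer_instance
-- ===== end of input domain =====

-- B replaces A's per-element prev_url loop by a two-pointer scan over maximal runs of equal
-- consecutive URLs (one dict access per run); same result, alternative decomposition.

-- ===== PORT A =====
-- {"visits": 0, "event_count": 0}
def pvInitA : PySem.Dict String Int := PySem.Dict.ofList [("visits", 0), ("event_count", 0)]

-- one iteration of A's inner `for url in sequence` loop; state = (metrics, prev_url)
def pvStepA (st : PySem.Dict String (PySem.Dict String Int) × Option String) (url : String) :
    PySem.Dict String (PySem.Dict String Int) × Option String :=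
  let m0 := if st.1.contains url then st.1 else st.1.insert url pvInitA
  let m1 := m0.modify url PySem.Dict.empty (fun d => d.modify "event_count" 0 (· + 1))
  let m2 := if some url ≠ st.2 then m1.modify url PySem.Dict.empty (fun d => d.modify "visits" 0 (· + 1)) else m1
  (m2, some url)

def calculate_node_metrics (sequences : List (List String)) : List (String × List (String × Int)) :=
  ((sequences.foldl (fun metrics sequence => (sequence.foldl pvStepA (metrics, none)).1)
      PySem.Dict.empty).items.map (fun p => (p.1, p.2.items)))

-- ===== PORT B =====
-- {"visits": 0, "event_count": 0}
def pvInitB : PySem.Dict String Int := PySem.Dict.ofList [("visits", 0), ("event_count", 0)]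

-- B's two-pointer scan: split a sequence into its maximal runs (url, run length);
-- the inner `while j < n and sequence[j] == url` is the takeWhile, advancing i = j is the dropWhile
def pvRuns : List String → List (String × Nat)
  | [] => []
  | x :: rest =>
    (x, (rest.takeWhile (· == x)).length + 1) :: pvRuns (rest.dropWhile (· == x))
termination_by l => l.length
decreasing_by
  have := List.length_dropWhile_le (· == x) rest
  simp only [List.length_cons]; omega

-- the body of B's outer while loop, for one run
def pvStepB (metrics : PySem.Dict String (PySem.Dict String Int)) (run : String × Nat) :
    PySem.Dict String (PySem.Dict String Int) :=
  let m0 := if metrics.contains run.1 then metrics else metrics.insert run.1 pvInitB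
  let m1 := m0.modify run.1 PySem.Dict.empty (fun d => d.modify "event_count" 0 (· + (run.2 : Int)))
  m1.modify run.1 PySem.Dict.empty (fun d => d.modify "visits" 0 (· + 1))

def calculate_node_metrics_alt (sequences : List (List String)) : List (String × List (String × Int)) :=
  ((sequences.foldl (fun metrics sequence => (pvRuns sequence).foldl pvStepB metrics)
      PySem.Dict.empty).items.map (fun p => (p.1, p.2.items)))

-- ===== PRECONDITION & SPEC =====
def Spec_calculate_node_metrics (sequences : List (List String)) (out : List (String × List (String × Int))) : Prop := out = calculate_node_metrics_alt sequences
instance (sequences : List (List String)) (out : List (String × List (String × Int))) : Decidable (Spec_calculate_node_metrics sequences out) := by unfold Spec_calculate_node_metrics; infer_instance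

-- ===== CLAIM (what is proved, stated in full; the proofs are below) =====
def Claim_equal_calculate_node_metrics : Prop := ∀ (sequences : List (List String)), Dom_calculate_node_metrics sequences → Spec_calculate_node_metrics sequences (calculate_node_metrics sequences)

-- ===== LEMMAS AND PROOFS =====

-- the canonical per-URL record
def pvVD (v e : Int) : PySem.Dict String Int := PySem.Dict.ofList [("visits", v), ("event_count", e)]

-- every value stored in the metrics dict is a canonical record
def pvInv (m : PySem.Dict String (PySem.Dict String Int)) : Prop :=
  ∀ p ∈ m.items, ∃ v e, p.2 = pvVD v e

lemma pvModify_eq_insert {ν : Type} (d : PySem.Dict String ν) (k : String) (dflt : ν) (f : ν → ν) :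
    d.modify k dflt f = d.insert k (f (d.getD k dflt)) := rfl

lemma pvInitB_eq_initA : pvInitB = pvInitA := rfl

lemma pvInitA_eq_vd : pvInitA = pvVD 0 0 := rfl

lemma pvVD_getD_ec (v e : Int) : (pvVD v e).getD "event_count" 0 = e := rfl

lemma pvVD_getD_vis (v e : Int) : (pvVD v e).getD "visits" 0 = v := rfl

lemma pvVD_insert_ec (v e w : Int) : (pvVD v e).insert "event_count" w = pvVD v w := rfl

lemma pvVD_insert_vis (v e w : Int) : (pvVD v e).insert "visits" w = pvVD w e := rfl

lemma pvRuns_nil : pvRuns [] = [] := by rw [pvRuns]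

lemma pvRuns_cons (x : String) (rest : List String) :
    pvRuns (x :: rest)
      = (x, (rest.takeWhile (· == x)).length + 1) :: pvRuns (rest.dropWhile (· == x)) := by
  rw [pvRuns]

lemma pvInv_insert (m : PySem.Dict String (PySem.Dict String Int)) (x : String) (v e : Int)
    (h : pvInv m) : pvInv (m.insert x (pvVD v e)) := by
  intro p hp
  rcases (PySem.Dict.mem_items_insert m x (pvVD v e) p).1 hp with h1 | h1
  · exact ⟨v, e, by simp [h1]⟩
  · exact h p h1.1

-- A's steps on replicate: only event_count grows
lemma pvRunA (k : Nat) : ∀ (M : PySem.Dict String (PySem.Dict String Int)) (x : String) (v e : Int),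
    (List.replicate k x).foldl pvStepA (M.insert x (pvVD v e), some x)
      = (M.insert x (pvVD v (e + k)), some x) := by
  induction k with
  | zero => intro M x v e; simp
  | succ k ih =>
    intro M x v e
    have hstep : pvStepA (M.insert x (pvVD v e), some x) x
        = (M.insert x (pvVD v (e + 1)), some x) := by
      simp [pvStepA, PySem.Dict.contains_insert_self, pvModify_eq_insert,
        PySem.Dict.getD_insert_self, pvVD_getD_ec, pvVD_insert_ec,
        PySem.Dict.insert_insert_self]
    have harith : e + 1 + (k : Int) = e + ((k + 1 : Nat) : Int) := by push_cast; ring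
    rw [List.replicate_succ, List.foldl_cons, hstep, ih, harith]

-- first element of a run (prev ≠ url): both counters grow
lemma pvStepA_first (m : PySem.Dict String (PySem.Dict String Int)) (prev : Option String)
    (x : String) (v e : Int)
    (h : (if m.contains x then m else m.insert x pvInitA).get? x = some (pvVD v e))
    (hne : some x ≠ prev) :
    pvStepA (m, prev) x
      = ((if m.contains x then m else m.insert x pvInitA).insert x (pvVD (v + 1) (e + 1)), some x) := by
  simp only [pvStepA, if_pos hne, pvModify_eq_insert,
    PySem.Dict.getD_eq_get?_getD _ x, h, PySem.Dict.get?_insert_self, Option.getD_some,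
    pvVD_getD_ec, pvVD_insert_ec, pvVD_getD_vis, pvVD_insert_vis,
    PySem.Dict.insert_insert_self]

-- a whole run: A's (k+1) element steps equal B's single run step
lemma pvRun_both (m : PySem.Dict String (PySem.Dict String Int)) (x : String) (prev : Option String)
    (hprev : some x ≠ prev) (hInv : pvInv m) (k : Nat) :
    (x :: List.replicate k x).foldl pvStepA (m, prev) = (pvStepB m (x, k + 1), some x)
      ∧ pvInv (pvStepB m (x, k + 1)) := by
  set M := if m.contains x then m else m.insert x pvInitA with hM
  have hInvM : pvInv M := by
    rw [hM]; split
    · exact hInv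
    · rw [pvInitA_eq_vd]; exact pvInv_insert m x 0 0 hInv
  obtain ⟨v, e, hget⟩ : ∃ v e, M.get? x = some (pvVD v e) := by
    rw [hM]
    cases hc : m.contains x with
    | true =>
      simp only [if_pos]
      have : (m.get? x).isSome := by rw [← PySem.Dict.contains_eq_isSome_get?, hc]
      obtain ⟨d, hd⟩ := Option.isSome_iff_exists.1 this
      obtain ⟨v, e, hve⟩ := hInv (x, d) (PySem.Dict.mem_items_of_get?_eq_some m hd)
      exact ⟨v, e, by rw [hd]; simp at hve; rw [hve]⟩
    | false =>
      simp only [Bool.false_eq_true, reduceIte]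
      exact ⟨0, 0, by rw [pvInitA_eq_vd]; exact PySem.Dict.get?_insert_self m x (pvVD 0 0)⟩
  have hB : pvStepB m (x, k + 1) = M.insert x (pvVD (v + 1) (e + (k + 1))) := by
    simp only [pvStepB, pvInitB_eq_initA, ← hM, pvModify_eq_insert,
      PySem.Dict.getD_eq_get?_getD _ x, hget, PySem.Dict.get?_insert_self, Option.getD_some,
      pvVD_getD_ec, pvVD_insert_ec, pvVD_getD_vis, pvVD_insert_vis,
      PySem.Dict.insert_insert_self]
    norm_cast
  constructor
  · have harith : e + 1 + (k : Int) = e + ((k : Int) + 1) := by ring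
    rw [List.foldl_cons, pvStepA_first m prev x v e (by rw [← hM]; exact hget) hprev, ← hM,
      pvRunA k M x (v + 1) (e + 1), harith, hB]
  · rw [hB]
    exact pvInv_insert M x _ _ hInvM

-- the takeWhile prefix of a run is a replicate
lemma pvTakeWhile_replicate (l : List String) (x : String) :
    l.takeWhile (· == x) = List.replicate (l.takeWhile (· == x)).length x := by
  apply List.eq_replicate_of_mem
  intro b hb
  simpa using List.mem_takeWhile_imp hb

-- one full sequence: A's element loop equals B's run loop, and the invariant is kept
lemma pvInner_eq : ∀ (seq : List String) (m : PySem.Dict String (PySem.Dict String Int))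
    (prev : Option String), pvInv m → (∀ y, seq.head? = some y → some y ≠ prev) →
    (seq.foldl pvStepA (m, prev)).1 = (pvRuns seq).foldl pvStepB m
      ∧ pvInv ((pvRuns seq).foldl pvStepB m)
  | [], m, prev, hInv, _ => by
    rw [pvRuns_nil]
    exact ⟨rfl, hInv⟩
  | x :: rest, m, prev, hInv, hhead => by
    have hprev : some x ≠ prev := hhead x rfl
    set tk := rest.takeWhile (· == x) with htk
    set dr := rest.dropWhile (· == x) with hdr
    have hsplit : x :: rest = (x :: List.replicate tk.length x) ++ dr := by
      simp only [List.cons_append]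
      rw [htk, ← pvTakeWhile_replicate rest x, hdr, List.takeWhile_append_dropWhile]
    obtain ⟨hrun, hInv'⟩ := pvRun_both m x prev hprev hInv tk.length
    have hheadDr : ∀ y, dr.head? = some y → some y ≠ some x := by
      intro y hy hxy
      have := List.head?_dropWhile_not (· == x) rest
      rw [← hdr, hy] at this
      simp at this
      exact this (by injection hxy)
    have hlen : dr.length < (x :: rest).length := by
      have := List.length_dropWhile_le (· == x) rest
      rw [← hdr] at this
      simp only [List.length_cons]; omega
    obtain ⟨ih1, ih2⟩ := pvInner_eq dr (pvStepB m (x, tk.length + 1)) (some x) hInv' hheadDr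
    constructor
    · conv_rhs => rw [pvRuns_cons, List.foldl_cons]
      rw [← htk, ← hdr, ← ih1]
      conv_lhs => rw [hsplit]
      rw [List.foldl_append, hrun]
    · rw [pvRuns_cons, List.foldl_cons, ← htk, ← hdr]
      exact ih2
  termination_by seq => seq.length
  decreasing_by exact hlen

-- all sequences
lemma pvOuter_eq : ∀ (seqs : List (List String)) (m : PySem.Dict String (PySem.Dict String Int)),
    pvInv m →
    seqs.foldl (fun metrics sequence => (sequence.foldl pvStepA (metrics, none)).1) m
      = seqs.foldl (fun metrics sequence => (pvRuns sequence).foldl pvStepB metrics) m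
  | [], _, _ => rfl
  | s :: rest, m, hInv => by
    obtain ⟨h1, h2⟩ := pvInner_eq s m none hInv (fun y _ => by simp)
    simp only [List.foldl_cons]
    rw [h1]
    exact pvOuter_eq rest _ h2

-- ===== VERDICT (by name: the statement is the Claim_ definition above) =====
theorem calculate_node_metrics_spec : Claim_equal_calculate_node_metrics := by
  intro sequences _
  show calculate_node_metrics sequences = calculate_node_metrics_alt sequences
  unfold calculate_node_metrics calculate_node_metrics_alt
  rw [pvOuter_eq sequences PySem.Dict.empty
    (fun p hp => absurd (show p ∈ ([] : List (String × PySem.Dict String Int)) from hp)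
      (List.not_mem_nil))]
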